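-- pv_equiv track=rewrite | github.com/BrunoBaia/Hackerrank | 51.py | func
-- ===== SOURCE A (Python) =====
-- def func(iterable):
--     step = iterable.pop(0) if iterable[0] >= iterable[-1] else iterable.pop(-1)
--     for _ in range(len(iterable)):
--         if step >= iterable[0] >= iterable[-1]:
--             step = iterable.pop(0)
--         elif step >= iterable[-1] >= iterable[0]:
--             step = iterable.pop(-1)
--         else:
--             return "No"
--     return "Yes"
-- ===== SOURCE B (Python) =====
-- def func(iterable):
--     # Two index pointers over the untouched list instead of A's pop(0)/pop(-1);
--     # unlike A, does not mutate the argument.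
--     l, e = 0, len(iterable)
--     if iterable[0] >= iterable[e - 1]:
--         step = iterable[0]
--         l = 1
--     else:
--         step = iterable[e - 1]
--         e -= 1
--     while l < e:
--         f, b = iterable[l], iterable[e - 1]
--         if step >= f >= b:
--             step = f
--             l += 1
--         elif step >= b >= f:
--             step = b
--             e -= 1
--         else:
--             return "No"
--     return "Yes"
-- ===== Notes on version B (the rewrite author's own statement) =====
-- stated objective: alternative
-- what changed: B walks two index pointers (left index, exclusive right end) over the untouched list with a running step instead of repeatedly popping elements off both ends; A also mutates its argument in place, B does not.
import Mathlib
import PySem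

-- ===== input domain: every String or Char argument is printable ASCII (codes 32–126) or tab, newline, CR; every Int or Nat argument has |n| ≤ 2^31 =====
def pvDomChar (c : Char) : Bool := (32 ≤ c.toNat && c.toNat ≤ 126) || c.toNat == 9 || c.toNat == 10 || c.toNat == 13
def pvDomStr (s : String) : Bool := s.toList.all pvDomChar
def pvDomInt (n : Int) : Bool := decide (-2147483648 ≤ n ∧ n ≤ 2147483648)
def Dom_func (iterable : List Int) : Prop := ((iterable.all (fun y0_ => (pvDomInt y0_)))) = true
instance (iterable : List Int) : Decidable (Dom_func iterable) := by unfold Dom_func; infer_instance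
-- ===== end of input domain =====

-- B replaces A's pop(0)/pop(-1) simulation by two index pointers over the untouched list (alternative, no pops);
-- A mutates its argument in place (pops), B does not — the equivalence proved here is about the return value only.

-- ===== PORT A =====
-- A's for-loop: runs exactly `n` times over the shrinking list (pop(0) = tail, pop(-1) = dropLast);
-- the `none` arm is Python's IndexError (unreachable while n = length of the remaining list).
def funcLoopA : Nat → Int → List Int → String
  | 0, _, _ => "Yes"
  | n + 1, step, xs =>
    match PySem.List.pyGet? xs 0, PySem.List.pyGet? xs (-1) with
    | some f, some b =>
      if step ≥ f ∧ f ≥ b then funcLoopA n f xs.tail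
      else if step ≥ b ∧ b ≥ f then funcLoopA n b xs.dropLast
      else "No"
    | _, _ => "No"

def func (iterable : List Int) : String :=
  match PySem.List.pyGet? iterable 0, PySem.List.pyGet? iterable (-1) with
  | some f0, some b0 =>
    if f0 ≥ b0 then funcLoopA (iterable.length - 1) f0 iterable.tail
    else funcLoopA (iterable.length - 1) b0 iterable.dropLast
  | _, _ => "No"   -- empty list: Python raises IndexError here; excluded by Pre_func

-- ===== PORT B =====
-- B's while-loop over indices l (inclusive) and e (exclusive end); getD is exact since l < e ≤ length inside the loop.
def funcLoopBAux (xs : List Int) : Nat → Nat → Nat → Int → String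
  | 0, _, _, _ => "Yes"                     -- fuel 0 ⇔ l ≥ e: the while-loop exits
  | fuel + 1, l, e, step =>
    if l < e then
      let f := xs.getD l 0
      let b := xs.getD (e - 1) 0
      if step ≥ f ∧ f ≥ b then funcLoopBAux xs fuel (l + 1) e f
      else if step ≥ b ∧ b ≥ f then funcLoopBAux xs fuel l (e - 1) b
      else "No"
    else "Yes"

-- the fuel e - l is exactly the number of remaining iterations of B's while-loop
def funcLoopB (xs : List Int) (l e : Nat) (step : Int) : String :=
  funcLoopBAux xs (e - l) l e step

def func_alt (iterable : List Int) : String :=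
  match PySem.List.pyGet? iterable 0, PySem.List.pyGet? iterable (-1) with
  | some f0, some b0 =>
    if f0 ≥ b0 then funcLoopB iterable 1 iterable.length f0
    else funcLoopB iterable 0 (iterable.length - 1) b0
  | _, _ => "No"   -- empty list: Python raises IndexError here; excluded by Pre_func

-- ===== PRECONDITION & SPEC =====
-- Both A and B raise IndexError on the empty list; nothing else is excluded.
def Pre_func (iterable : List Int) : Prop := iterable ≠ []
instance (iterable : List Int) : Decidable (Pre_func iterable) := by unfold Pre_func; infer_instance
def pvWitness_func : List Int := ([4, 3, 1, 2])

def Spec_func (iterable : List Int) (out : String) : Prop := out = func_alt iterable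
instance (iterable : List Int) (out : String) : Decidable (Spec_func iterable out) := by unfold Spec_func; infer_instance

-- ===== CLAIM (what is proved, stated in full; the proofs are below) =====
def Claim_equal_func : Prop := ∀ (iterable : List Int), Dom_func iterable → Pre_func iterable → Spec_func iterable (func iterable)

-- ===== LEMMAS AND PROOFS =====

-- The key invariant: A's remaining list is always the segment [l, e) of the original list,
-- and A's loop counter equals that segment's length.
lemma loop_eq (full : List Int) :
    ∀ (k l e : Nat) (step : Int), e ≤ full.length → l + k = e →
      funcLoopA k step ((full.drop l).take k) = funcLoopBAux full k l e step := by
  intro k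
  induction k with
  | zero =>
    intro l e step he hle
    simp [funcLoopA, funcLoopBAux]
  | succ k ih =>
    intro l e step he hle
    have hl : l < full.length := by omega
    have hlt : l < e := by omega
    have hlen : ((full.drop l).take (k + 1)).length = k + 1 := by
      simp; omega
    have hfront : PySem.List.pyGet? ((full.drop l).take (k + 1)) 0 = some full[l] := by
      rw [PySem.List.pyGet?_zero]
      rw [List.getElem?_take_of_lt (by omega), List.getElem?_drop]
      simp [hl]
    have hback : PySem.List.pyGet? ((full.drop l).take (k + 1)) (-1) = some full[e - 1] := by
      rw [PySem.List.pyGet?_neg_one, List.getLast?_eq_getElem?, hlen]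
      simp only [Nat.add_sub_cancel]
      rw [List.getElem?_take_of_lt (by omega), List.getElem?_drop]
      have : l + k = e - 1 := by omega
      simp [this, show e - 1 < full.length by omega]
    have hcons : full.drop l = full[l] :: full.drop (l + 1) := List.drop_eq_getElem_cons hl
    have htail : ((full.drop l).take (k + 1)).tail = (full.drop (l + 1)).take k := by
      rw [hcons, List.take_succ_cons, List.tail_cons]
    have hdrop : ((full.drop l).take (k + 1)).dropLast = (full.drop l).take k := by
      rw [List.dropLast_eq_take, hlen]
      simp [List.take_take]
    have hgl : full.getD l 0 = full[l] := List.getD_eq_getElem _ _ hl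
    have hge : full.getD (e - 1) 0 = full[e - 1] := List.getD_eq_getElem _ _ (by omega)
    simp only [funcLoopA, funcLoopBAux, hfront, hback, htail, hdrop, if_pos hlt, hgl, hge]
    split_ifs with h1 h2
    · exact ih (l + 1) e full[l] he (by omega)
    · exact ih l (e - 1) full[e - 1] (by omega) (by omega)
    · rfl

lemma func_eq_alt (iterable : List Int) (hpre : iterable ≠ []) :
    func iterable = func_alt iterable := by
  obtain ⟨a, rest, rfl⟩ : ∃ a rest, iterable = a :: rest := by
    cases iterable with
    | nil => exact absurd rfl hpre
    | cons a rest => exact ⟨a, rest, rfl⟩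
  unfold func func_alt
  have h0 : PySem.List.pyGet? (a :: rest) 0 = some a := by
    simp
  have hlast : ∃ b, PySem.List.pyGet? (a :: rest) (-1) = some b := by
    rw [PySem.List.pyGet?_neg_one]
    exact ⟨_, List.getLast?_eq_getLast_of_ne_nil (by simp)⟩
  obtain ⟨b, hb⟩ := hlast
  rw [h0, hb]
  dsimp only
  have hlen : (a :: rest).length = rest.length + 1 := by simp
  have htail : (a :: rest).tail = ((a :: rest).drop 1).take ((a :: rest).length - 1) := by
    simp [List.take_of_length_le]
  have hdl : (a :: rest).dropLast = ((a :: rest).drop 0).take ((a :: rest).length - 1) := by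
    simp [List.dropLast_eq_take]
  split_ifs with h
  · rw [show (a :: rest).tail = ((a :: rest).drop 1).take ((a :: rest).length - 1) from htail]
    unfold funcLoopB
    have := loop_eq (a :: rest) ((a :: rest).length - 1) 1 (a :: rest).length a
      (le_refl _) (by simp [Nat.add_comm])
    rw [show ((a :: rest).length - 1) = rest.length by simp] at this ⊢
    exact this
  · rw [show (a :: rest).dropLast = ((a :: rest).drop 0).take ((a :: rest).length - 1) from hdl]
    unfold funcLoopB
    rw [Nat.sub_zero]
    exact loop_eq (a :: rest) ((a :: rest).length - 1) 0 ((a :: rest).length - 1) b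
      (by simp) (by omega)

-- ===== VERDICT (by name: the statement is the Claim_ definition above) =====
theorem func_spec : Claim_equal_func := by
  intro iterable _ hpre
  exact func_eq_alt iterable hpre
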